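-- pv_equiv track=rewrite | github.com/ankan24/GFG-Solutions | Difficulty: Easy/Modify the Array/modify-the-array.py | modifyAndRearrangeArr
-- ===== SOURCE A (Python) =====
-- def modifyAndRearrangeArr (arr) :
--   #Complete the function
--   n=len(arr)
--   for i in range(n-1):
--       if arr[i]!=0 and arr[i]==arr[i+1]:
--           arr[i]=2*arr[i]
--           arr[i+1]=0
--   ans=[num for num in arr if num!= 0]
--   s=len(ans)
--   for i in range(s,n):
--       ans.append(0)
--   return ans
-- ===== SOURCE B (Python) =====
-- def modifyAndRearrangeArr(arr):
--     # single variable-step scan; equivalence is about the RETURN value (B does not mutate arr)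
--     n = len(arr)
--     ans = []
--     i = 0
--     while i < n:
--         v = arr[i]
--         if v != 0 and i + 1 < n and v == arr[i + 1]:
--             ans.append(2 * v)
--             i += 2
--         elif v != 0:
--             ans.append(v)
--             i += 1
--         else:
--             i += 1
--     return ans + [0] * (n - len(ans))
-- ===== Notes on version B (the rewrite author's own statement) =====
-- stated objective: alternative
-- what changed: Replaced A's three phases (mutating pairwise-merge pass, nonzero filter, zero-append loop) with a single variable-step scan that emits merged/nonzero values directly and pads once.
import Mathlib
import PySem

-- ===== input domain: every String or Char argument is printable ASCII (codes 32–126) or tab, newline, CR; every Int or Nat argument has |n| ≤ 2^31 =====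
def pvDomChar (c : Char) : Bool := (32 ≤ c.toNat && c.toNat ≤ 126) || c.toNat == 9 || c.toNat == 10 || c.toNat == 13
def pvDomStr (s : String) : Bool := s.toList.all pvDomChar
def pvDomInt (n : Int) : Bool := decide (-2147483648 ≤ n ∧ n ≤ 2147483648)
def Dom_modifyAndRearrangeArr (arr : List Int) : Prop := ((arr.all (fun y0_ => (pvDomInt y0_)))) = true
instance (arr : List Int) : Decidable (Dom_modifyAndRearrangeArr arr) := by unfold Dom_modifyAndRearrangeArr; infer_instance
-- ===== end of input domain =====

-- B fuses A's three phases (mutating merge pass, nonzero filter, zero-append loop) into one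
-- variable-step scan; equivalence is about the RETURN value only (A mutates arr, B does not).

-- ===== PORT A =====
-- one iteration of A's first loop: 'if arr[i]!=0 and arr[i]==arr[i+1]: arr[i]=2*arr[i]; arr[i+1]=0'
def pvStepA (a : List Int) (i : Nat) : List Int :=
  if a.getD i 0 ≠ 0 ∧ a.getD i 0 = a.getD (i + 1) 0 then
    (a.set i (2 * a.getD i 0)).set (i + 1) 0
  else a

def modifyAndRearrangeArr (arr : List Int) : List Int :=
  let n := arr.length
  let arr2 := (List.range (n - 1)).foldl pvStepA arr
  let ans := arr2.filter (fun num => num ≠ 0)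
  let s := ans.length
  (List.range' s (n - s)).foldl (fun acc _ => acc ++ [0]) ans

-- ===== PORT B =====
-- the 'while i < n' scan of Source B (structural recursion on n - i)
def pvAltLoop (arr : List Int) (n : Nat) (i : Nat) : List Int :=
  if _h : i < n then
    let v := arr.getD i 0
    if v ≠ 0 ∧ i + 1 < n ∧ v = arr.getD (i + 1) 0 then
      2 * v :: pvAltLoop arr n (i + 2)
    else if v ≠ 0 then
      v :: pvAltLoop arr n (i + 1)
    else
      pvAltLoop arr n (i + 1)
  else []
termination_by n - i

def modifyAndRearrangeArr_alt (arr : List Int) : List Int :=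
  let n := arr.length
  let ans := pvAltLoop arr n 0
  ans ++ List.replicate (n - ans.length) 0

-- ===== PRECONDITION & SPEC =====
def Spec_modifyAndRearrangeArr (arr : List Int) (out : List Int) : Prop := out = modifyAndRearrangeArr_alt arr
instance (arr : List Int) (out : List Int) : Decidable (Spec_modifyAndRearrangeArr arr out) := by unfold Spec_modifyAndRearrangeArr; infer_instance

-- ===== CLAIM (what is proved, stated in full; the proofs are below) =====
def Claim_equal_modifyAndRearrangeArr : Prop := ∀ (arr : List Int), Dom_modifyAndRearrangeArr arr → Spec_modifyAndRearrangeArr arr (modifyAndRearrangeArr arr)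

-- ===== LEMMAS AND PROOFS =====

-- the array left behind by A's first loop, described by structural recursion on the list
def pvMerge : List Int → List Int
  | x :: y :: rest =>
      if x ≠ 0 ∧ x = y then 2 * x :: 0 :: pvMerge rest
      else x :: pvMerge (y :: rest)
  | l => l

theorem pvMerge_nil : pvMerge [] = [] := rfl
theorem pvMerge_single (x : Int) : pvMerge [x] = [x] := rfl
theorem pvMerge_zero_cons (l : List Int) : pvMerge (0 :: l) = 0 :: pvMerge l := by
  cases l <;> simp [pvMerge]

theorem pvDrop_lt {arr : List Int} {i : Nat} {x : Int} {t : List Int}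
    (h : arr.drop i = x :: t) : i < arr.length := by
  by_contra hc
  rw [List.drop_eq_nil_of_le (Nat.le_of_not_lt hc)] at h
  cases h

theorem pvDrop_getD {arr : List Int} {i : Nat} {x : Int} {t : List Int}
    (h : arr.drop i = x :: t) : arr.getD i 0 = x := by
  have h2 : arr[i + 0]? = some x := by rw [← List.getElem?_drop, h]; rfl
  simp at h2
  simp [List.getD_eq_getElem?_getD, h2]

theorem pvDrop_succ {arr : List Int} {i : Nat} {x : Int} {t : List Int}
    (h : arr.drop i = x :: t) : arr.drop (i + 1) = t := by
  have h1 : arr.drop (i + 1) = (arr.drop i).drop 1 := by rw [List.drop_drop]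
  simp [h1, h]

-- A's first loop, started at index p.length with the prefix p already final, yields p ++ pvMerge t
theorem pvRun_eq : ∀ (t p : List Int),
    (List.range' p.length (t.length - 1)).foldl pvStepA (p ++ t) = p ++ pvMerge t
  | [], _p => by simp [pvMerge]
  | [_x], _p => by simp [pvMerge]
  | x :: y :: rest, p => by
    have hx : (p ++ x :: y :: rest).getD p.length 0 = x := by
      simp [List.getD_eq_getElem?_getD, List.getElem?_append_right]
    have hy : (p ++ x :: y :: rest).getD (p.length + 1) 0 = y := by
      simp [List.getD_eq_getElem?_getD, List.getElem?_append_right]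
    have hlen : (x :: y :: rest).length - 1 = rest.length + 1 := by simp
    rw [hlen, List.range'_succ, List.foldl_cons]
    by_cases hc : x ≠ 0 ∧ x = y
    · obtain ⟨hx0, hyx⟩ := hc
      subst hyx
      have hstep : pvStepA (p ++ x :: x :: rest) p.length = (p ++ [2 * x]) ++ 0 :: rest := by
        simp [pvStepA, hx, hy, hx0]
      have hm : pvMerge (x :: x :: rest) = 2 * x :: 0 :: pvMerge rest := by
        simp [pvMerge, hx0]
      have ih := pvRun_eq (0 :: rest) (p ++ [2 * x])
      simp [pvMerge_zero_cons] at ih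
      rw [hstep, hm]
      simpa using ih
    · have hstep : pvStepA (p ++ x :: y :: rest) p.length = (p ++ [x]) ++ y :: rest := by
        simp [pvStepA, hx, hy, hc]
      have hm : pvMerge (x :: y :: rest) = x :: pvMerge (y :: rest) := by
        simp [pvMerge, hc]
      have ih := pvRun_eq (y :: rest) (p ++ [x])
      simp at ih
      rw [hstep, hm]
      simpa using ih
termination_by t _ => t.length

-- B's scan from index i computes the nonzero-filtered merge of the remaining suffix
theorem pvAltLoop_eq : ∀ (t arr : List Int) (i : Nat), arr.drop i = t →
    pvAltLoop arr arr.length i = (pvMerge t).filter (fun num => num ≠ 0)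
  | [], arr, i, ht => by
    have hge : arr.length ≤ i := List.drop_eq_nil_iff.mp ht
    rw [pvAltLoop]
    simp [Nat.not_lt.mpr hge, pvMerge_nil]
  | [x], arr, i, ht => by
    have hi : i < arr.length := pvDrop_lt ht
    have hx : arr.getD i 0 = x := pvDrop_getD ht
    have hnil : arr.drop (i + 1) = [] := pvDrop_succ ht
    have hge : arr.length ≤ i + 1 := List.drop_eq_nil_iff.mp hnil
    have ih := pvAltLoop_eq [] arr (i + 1) hnil
    rw [pvAltLoop]
    simp only [hi, dif_pos, hx]
    by_cases hx0 : x = 0 <;>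
      simp [hx0, Nat.not_lt.mpr hge, ih, pvMerge_single, pvMerge_nil]
  | x :: y :: rest, arr, i, ht => by
    have hi : i < arr.length := pvDrop_lt ht
    have hx : arr.getD i 0 = x := pvDrop_getD ht
    have hd1 : arr.drop (i + 1) = y :: rest := pvDrop_succ ht
    have hi1 : i + 1 < arr.length := pvDrop_lt hd1
    have hy : arr.getD (i + 1) 0 = y := pvDrop_getD hd1
    have hd2 : arr.drop (i + 2) = rest := pvDrop_succ hd1
    rw [pvAltLoop]
    simp only [hi, dif_pos, hx, hy, hi1]
    by_cases hc : x ≠ 0 ∧ x = y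
    · obtain ⟨hx0, hyx⟩ := hc
      subst hyx
      have ih := pvAltLoop_eq rest arr (i + 2) hd2
      have h2x : ¬ (2 * x = 0) := by
        intro h; exact hx0 (by omega)
      have hm : pvMerge (x :: x :: rest) = 2 * x :: 0 :: pvMerge rest := by
        simp [pvMerge, hx0]
      rw [if_pos ⟨hx0, trivial, rfl⟩, hm, ih]
      simp [List.filter_cons, h2x]
    · have ih := pvAltLoop_eq (y :: rest) arr (i + 1) hd1
      have hm : pvMerge (x :: y :: rest) = x :: pvMerge (y :: rest) := by
        simp [pvMerge, hc]
      rw [if_neg (by tauto), hm]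
      by_cases hx0 : x = 0
      · simp [hx0, ih]
      · simp [hx0, ih, List.filter_cons]
termination_by t _ _ _ => t.length

-- the zero-appending loop of A equals appending replicate k 0
theorem pvPad (k : Nat) : ∀ (s : Nat) (ans : List Int),
    (List.range' s k).foldl (fun acc _ => acc ++ [0]) ans = ans ++ List.replicate k 0 := by
  induction k with
  | zero => intro s ans; simp
  | succ k ih =>
    intro s ans
    rw [List.range'_succ, List.foldl_cons, ih]
    simp [List.replicate_succ]

-- ===== VERDICT (by name: the statement is the Claim_ definition above) =====
theorem modifyAndRearrangeArr_spec : Claim_equal_modifyAndRearrangeArr := by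
  intro arr _
  unfold Spec_modifyAndRearrangeArr modifyAndRearrangeArr modifyAndRearrangeArr_alt
  have hrun := pvRun_eq arr []
  simp only [List.length_nil, List.nil_append] at hrun
  have halt := pvAltLoop_eq arr arr 0 (by simp)
  simp only [List.range_eq_range', hrun, halt, pvPad]
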